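-- pv_equiv track=rewrite | github.com/robinkiplangat/ew-agents | ew_agents/data_eng_tools.py | detect_risk_patterns_simple
-- ===== SOURCE A (Python) =====
-- from typing import Dict, List, Any, Optional, Union
--
-- def detect_risk_patterns_simple(text: str) -> List[str]:
--     """Simple risk pattern detection."""
--     risk_indicators = []
--     text_lower = text.lower()
--
--     # Election fraud claims
--     if any(word in text_lower for word in ['rigged', 'fraud', 'manipulation', 'fake', 'stolen']):
--         risk_indicators.append("election_fraud_claims")
--
--     # Violence incitement
--     if any(word in text_lower for word in ['violence', 'fight', 'attack', 'kill', 'destroy']):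
--         risk_indicators.append("violence_incitement")
--
--     # Voter suppression
--     if any(word in text_lower for word in ['dont vote', "don't vote", 'boycott', 'stay home']):
--         risk_indicators.append("voter_suppression")
--
--     # Misinformation indicators
--     if any(word in text_lower for word in ['fake news', 'lies', 'propaganda', 'conspiracy']):
--         risk_indicators.append("misinformation")
--
--     # Hate speech indicators
--     if any(word in text_lower for word in ['hate', 'enemy', 'traitor', 'destroy them']):
--         risk_indicators.append("hate_speech")
--
--     return risk_indicators
-- ===== SOURCE B (Python) =====
-- # Text-position-driven scan: walk every start position of the lowered text once,
-- # prefix-match the flat keyword table there, collect hit categories in a set,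
-- # then emit the category names in canonical order.
-- KEYWORD_CATEGORY = [
--     ('rigged', 'election_fraud_claims'),
--     ('fraud', 'election_fraud_claims'),
--     ('manipulation', 'election_fraud_claims'),
--     ('fake', 'election_fraud_claims'),
--     ('stolen', 'election_fraud_claims'),
--     ('violence', 'violence_incitement'),
--     ('fight', 'violence_incitement'),
--     ('attack', 'violence_incitement'),
--     ('kill', 'violence_incitement'),
--     ('destroy', 'violence_incitement'),
--     ('dont vote', 'voter_suppression'),
--     ("don't vote", 'voter_suppression'),
--     ('boycott', 'voter_suppression'),
--     ('stay home', 'voter_suppression'),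
--     ('fake news', 'misinformation'),
--     ('lies', 'misinformation'),
--     ('propaganda', 'misinformation'),
--     ('conspiracy', 'misinformation'),
--     ('hate', 'hate_speech'),
--     ('enemy', 'hate_speech'),
--     ('traitor', 'hate_speech'),
--     ('destroy them', 'hate_speech'),
-- ]
--
-- CATEGORY_ORDER = ['election_fraud_claims', 'violence_incitement',
--                   'voter_suppression', 'misinformation', 'hate_speech']
--
--
-- def detect_risk_patterns_simple(text: str):
--     s = text.lower()
--     hit = set()
--     for i in range(len(s) + 1):
--         tail = s[i:]
--         for word, cat in KEYWORD_CATEGORY: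
--             if tail.startswith(word):
--                 hit.add(cat)
--     return [c for c in CATEGORY_ORDER if c in hit]
-- ===== Notes on version B (the rewrite author's own statement) =====
-- stated objective: alternative
-- what changed: Instead of one substring search per keyword, B scans every start position of the lowered text once, prefix-matches a flat keyword->category table there, accumulates hit categories in a set, and emits the categories in canonical order.
import Mathlib
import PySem

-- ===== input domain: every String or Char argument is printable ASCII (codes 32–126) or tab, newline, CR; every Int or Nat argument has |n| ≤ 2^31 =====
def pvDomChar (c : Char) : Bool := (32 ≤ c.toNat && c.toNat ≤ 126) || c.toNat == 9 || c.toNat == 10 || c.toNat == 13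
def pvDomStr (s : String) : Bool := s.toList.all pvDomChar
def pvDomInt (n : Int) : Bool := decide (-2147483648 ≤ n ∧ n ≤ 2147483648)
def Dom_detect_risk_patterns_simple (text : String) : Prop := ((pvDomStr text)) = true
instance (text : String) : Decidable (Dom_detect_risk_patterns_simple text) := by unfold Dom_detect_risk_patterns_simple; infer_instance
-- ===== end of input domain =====

-- B replaces per-keyword substring searches by a single scan over all start positions of
-- the lowered text: at each position it prefix-matches a flat keyword->category table,
-- collects hit categories in a set, and emits them in canonical order (no speed claim).

-- ===== PORT A =====
def detect_risk_patterns_simple (text : String) : List String :=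
  let risk_indicators : List String := []
  let text_lower := PySem.Str.lower text
  let risk_indicators :=
    if (["rigged", "fraud", "manipulation", "fake", "stolen"].any
        (fun word => PySem.Str.isIn word text_lower)) then
      risk_indicators ++ ["election_fraud_claims"] else risk_indicators
  let risk_indicators :=
    if (["violence", "fight", "attack", "kill", "destroy"].any
        (fun word => PySem.Str.isIn word text_lower)) then
      risk_indicators ++ ["violence_incitement"] else risk_indicators
  let risk_indicators :=
    if (["dont vote", "don't vote", "boycott", "stay home"].any
        (fun word => PySem.Str.isIn word text_lower)) then
      risk_indicators ++ ["voter_suppression"] else risk_indicators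
  let risk_indicators :=
    if (["fake news", "lies", "propaganda", "conspiracy"].any
        (fun word => PySem.Str.isIn word text_lower)) then
      risk_indicators ++ ["misinformation"] else risk_indicators
  let risk_indicators :=
    if (["hate", "enemy", "traitor", "destroy them"].any
        (fun word => PySem.Str.isIn word text_lower)) then
      risk_indicators ++ ["hate_speech"] else risk_indicators
  risk_indicators

-- ===== PORT B =====
def kwTable : List (String × String) :=
  [("rigged", "election_fraud_claims"), ("fraud", "election_fraud_claims"),
   ("manipulation", "election_fraud_claims"), ("fake", "election_fraud_claims"),
   ("stolen", "election_fraud_claims"),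
   ("violence", "violence_incitement"), ("fight", "violence_incitement"),
   ("attack", "violence_incitement"), ("kill", "violence_incitement"),
   ("destroy", "violence_incitement"),
   ("dont vote", "voter_suppression"), ("don't vote", "voter_suppression"),
   ("boycott", "voter_suppression"), ("stay home", "voter_suppression"),
   ("fake news", "misinformation"), ("lies", "misinformation"),
   ("propaganda", "misinformation"), ("conspiracy", "misinformation"),
   ("hate", "hate_speech"), ("enemy", "hate_speech"),
   ("traitor", "hate_speech"), ("destroy them", "hate_speech")]

def catOrder : List String :=
  ["election_fraud_claims", "violence_incitement", "voter_suppression",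
   "misinformation", "hate_speech"]

-- the double loop of Source B: for i in range(len(s)+1): for word, cat in KEYWORD_CATEGORY:
--   if s[i:].startswith(word): hit.add(cat)      (s[i:] for 0 ≤ i is List.drop; exact)
def hitSet (s : List Char) : PySem.Set String :=
  (List.range (s.length + 1)).foldl
    (fun acc i => kwTable.foldl
      (fun acc2 p =>
        if PySem.Chars.startswith (s.drop i) p.1.toList then PySem.Set.add acc2 p.2
        else acc2) acc)
    PySem.Set.empty

def detect_risk_patterns_simple_alt (text : String) : List String :=
  let s := (PySem.Str.lower text).toList
  let hit := hitSet s
  catOrder.filter (fun c => PySem.Set.contains hit c)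

-- ===== PRECONDITION & SPEC =====
def Spec_detect_risk_patterns_simple (text : String) (out : List String) : Prop := out = detect_risk_patterns_simple_alt text
instance (text : String) (out : List String) : Decidable (Spec_detect_risk_patterns_simple text out) := by unfold Spec_detect_risk_patterns_simple; infer_instance

-- ===== CLAIM (what is proved, stated in full; the proofs are below) =====
def Claim_equal_detect_risk_patterns_simple : Prop := ∀ (text : String), Dom_detect_risk_patterns_simple text → Spec_detect_risk_patterns_simple text (detect_risk_patterns_simple text)

-- ===== LEMMAS AND PROOFS =====

theorem mem_inner (s : List Char) (i : ℕ) (tbl : List (String × String))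
    (acc : PySem.Set String) (c : String) :
    c ∈ tbl.foldl
      (fun acc2 p =>
        if PySem.Chars.startswith (s.drop i) p.1.toList then PySem.Set.add acc2 p.2
        else acc2) acc ↔
    c ∈ acc ∨ ∃ p ∈ tbl, PySem.Chars.startswith (s.drop i) p.1.toList = true ∧ p.2 = c := by
  induction tbl generalizing acc with
  | nil => simp
  | cons hd tl ih =>
    simp only [List.foldl_cons, List.mem_cons, ih]
    split_ifs with h <;> simp [PySem.Set.mem_add, h] <;> tauto

theorem mem_outer (s : List Char) (rng : List ℕ) (acc : PySem.Set String) (c : String) :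
    c ∈ rng.foldl
      (fun acc i => kwTable.foldl
        (fun acc2 p =>
          if PySem.Chars.startswith (s.drop i) p.1.toList then PySem.Set.add acc2 p.2
          else acc2) acc) acc ↔
    c ∈ acc ∨ ∃ i ∈ rng, ∃ p ∈ kwTable,
      PySem.Chars.startswith (s.drop i) p.1.toList = true ∧ p.2 = c := by
  induction rng generalizing acc with
  | nil => simp
  | cons hd tl ih =>
    simp only [List.foldl_cons, List.mem_cons, ih, mem_inner]
    constructor
    · rintro ((h | ⟨p, hp, h1, h2⟩) | ⟨i, hi, p, hp, h1, h2⟩)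
      exacts [Or.inl h, Or.inr ⟨hd, Or.inl rfl, p, hp, h1, h2⟩,
        Or.inr ⟨i, Or.inr hi, p, hp, h1, h2⟩]
    · rintro (h | ⟨i, (rfl | hi), p, hp, h1, h2⟩)
      exacts [Or.inl (Or.inl h), Or.inl (Or.inr ⟨p, hp, h1, h2⟩),
        Or.inr ⟨i, hi, p, hp, h1, h2⟩]

theorem exists_pos_iff (s w : List Char) :
    (∃ i ∈ List.range (s.length + 1), PySem.Chars.startswith (s.drop i) w = true) ↔
    PySem.Chars.isIn w s = true := by
  rw [← PySem.Chars.exists_prefix_drop_iff_isIn]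
  constructor
  · rintro ⟨i, -, h⟩
    exact ⟨i, (PySem.Chars.startswith_iff _ _).mp h⟩
  · rintro ⟨j, hj⟩
    by_cases hle : j < s.length + 1
    · exact ⟨j, List.mem_range.mpr hle, (PySem.Chars.startswith_iff _ _).mpr hj⟩
    · have hdrop : s.drop j = [] := List.drop_eq_nil_of_le (by omega)
      rw [hdrop] at hj
      have hw : w = [] := List.prefix_nil.mp hj
      exact ⟨0, List.mem_range.mpr (by omega), (PySem.Chars.startswith_iff _ _).mpr
        (by simp [hw])⟩

theorem mem_hitSet (s : List Char) (c : String) :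
    c ∈ hitSet s ↔ ∃ p ∈ kwTable, PySem.Chars.isIn p.1.toList s = true ∧ p.2 = c := by
  unfold hitSet
  rw [mem_outer]
  constructor
  · rintro (h | ⟨i, hi, p, hp, hsw, hc⟩)
    · simp [PySem.Set.empty] at h
    · exact ⟨p, hp, (exists_pos_iff s p.1.toList).mp ⟨i, hi, hsw⟩, hc⟩
  · rintro ⟨p, hp, hin, hc⟩
    rcases (exists_pos_iff s p.1.toList).mpr hin with ⟨i, hi, hsw⟩
    exact Or.inr ⟨i, hi, p, hp, hsw, hc⟩

theorem contains_hitSet (s : List Char) (c : String) :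
    PySem.Set.contains (hitSet s) c =
      kwTable.any (fun p => p.2 == c && PySem.Chars.isIn p.1.toList s) := by
  rw [Bool.eq_iff_iff, PySem.Set.contains_iff, mem_hitSet, List.any_eq_true]
  constructor
  · rintro ⟨p, hp, hin, hc⟩
    exact ⟨p, hp, by simp [hc, hin]⟩
  · rintro ⟨p, hp, h⟩
    simp only [Bool.and_eq_true, beq_iff_eq] at h
    exact ⟨p, hp, h.2, h.1⟩

theorem hit1 (s : List Char) : PySem.Set.contains (hitSet s) "election_fraud_claims"
    = (PySem.Chars.isIn "rigged".toList s || (PySem.Chars.isIn "fraud".toList s ||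
       (PySem.Chars.isIn "manipulation".toList s || (PySem.Chars.isIn "fake".toList s ||
       PySem.Chars.isIn "stolen".toList s)))) := by
  rw [contains_hitSet]; simp [kwTable]

theorem hit2 (s : List Char) : PySem.Set.contains (hitSet s) "violence_incitement"
    = (PySem.Chars.isIn "violence".toList s || (PySem.Chars.isIn "fight".toList s ||
       (PySem.Chars.isIn "attack".toList s || (PySem.Chars.isIn "kill".toList s ||
       PySem.Chars.isIn "destroy".toList s)))) := by
  rw [contains_hitSet]; simp [kwTable]

theorem hit3 (s : List Char) : PySem.Set.contains (hitSet s) "voter_suppression"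
    = (PySem.Chars.isIn "dont vote".toList s || (PySem.Chars.isIn "don't vote".toList s ||
       (PySem.Chars.isIn "boycott".toList s || PySem.Chars.isIn "stay home".toList s))) := by
  rw [contains_hitSet]; simp [kwTable]

theorem hit4 (s : List Char) : PySem.Set.contains (hitSet s) "misinformation"
    = (PySem.Chars.isIn "fake news".toList s || (PySem.Chars.isIn "lies".toList s ||
       (PySem.Chars.isIn "propaganda".toList s || PySem.Chars.isIn "conspiracy".toList s))) := by
  rw [contains_hitSet]; simp [kwTable]

theorem hit5 (s : List Char) : PySem.Set.contains (hitSet s) "hate_speech"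
    = (PySem.Chars.isIn "hate".toList s || (PySem.Chars.isIn "enemy".toList s ||
       (PySem.Chars.isIn "traitor".toList s || PySem.Chars.isIn "destroy them".toList s))) := by
  rw [contains_hitSet]; simp [kwTable]

-- ===== VERDICT (by name: the statement is the Claim_ definition above) =====
theorem detect_risk_patterns_simple_spec : Claim_equal_detect_risk_patterns_simple := by
  intro text _
  unfold Spec_detect_risk_patterns_simple detect_risk_patterns_simple
    detect_risk_patterns_simple_alt catOrder
  simp only [List.filter_cons, List.filter_nil, hit1, hit2, hit3, hit4, hit5,
    PySem.Str.isIn_eq, List.any_cons, List.any_nil, Bool.or_false]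
  split_ifs <;> rfl
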